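-- pv_equiv track=rewrite | github.com/vsonson/balanceposition | src/main/python/metrics.py | mybalance_status
-- ===== SOURCE A (Python) =====
-- RED_TOO_MUCH = 'RED_TOO_MUCH'
--
-- RED_TOO_LITTLE = 'RED_TOO_LITTLE'
--
-- RED_TOO_VOLATILE = 'RED_TOO_VOLATILE'
--
-- RED = 'RED'
--
-- SHADED_YELLOW = 'SHADED_YELLOW'
--
-- YELLOW_TOO_MUCH = 'YELLOW_TOO_MUCH'
--
-- YELLOW_TOO_LITTLE = 'YELLOW_TOO_LITTLE'
--
-- YELLOW_TOO_VOLATILE = 'YELLOW_TOO_VOLATILE'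
--
-- YELLOW = 'YELLOW'
--
-- SHADE_INJURED_NAGGING = 'SHADE_INJURED_NAGGING'
--
-- SHADE_INJURED_NOTPLAYING = 'SHADE_INJURED_NOTPLAYING'
--
-- SHADE_DISORDERED = 'SHADE_DISORDERED_EATING'
--
-- SHADE_SELF_HARM = 'SHADE_SELFHARM'
--
-- SHADED_GREEN = 'SHADED_GREEN'
--
-- GREEN = 'GREEN'
--
-- def mybalance_status(status_list):
--     """Indicator of general status.
--
--        status_list is a list of the status codes for each
--        question in a user's question set.
--     """
--     reds = (RED_TOO_MUCH, RED_TOO_LITTLE, RED_TOO_VOLATILE, RED)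
--     yellows = (YELLOW_TOO_MUCH, YELLOW_TOO_LITTLE, YELLOW_TOO_VOLATILE, YELLOW)
--     shades = (SHADE_INJURED_NAGGING, SHADE_INJURED_NOTPLAYING, SHADE_DISORDERED, SHADE_SELF_HARM)
--
--     if any(s in reds for s in status_list):
--         return RED
--
--     elif any(s in yellows for s in status_list):
--         if any(s in shades for s in status_list):
--             return SHADED_YELLOW
--         else:
--             return YELLOW
--
--     else:
--         if any(s in shades for s in status_list):
--             return SHADED_GREEN
--         else:
--             return GREEN
-- ===== SOURCE B (Python) =====
-- RED_TOO_MUCH = 'RED_TOO_MUCH'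
-- RED_TOO_LITTLE = 'RED_TOO_LITTLE'
-- RED_TOO_VOLATILE = 'RED_TOO_VOLATILE'
-- RED = 'RED'
-- SHADED_YELLOW = 'SHADED_YELLOW'
-- YELLOW_TOO_MUCH = 'YELLOW_TOO_MUCH'
-- YELLOW_TOO_LITTLE = 'YELLOW_TOO_LITTLE'
-- YELLOW_TOO_VOLATILE = 'YELLOW_TOO_VOLATILE'
-- YELLOW = 'YELLOW'
-- SHADE_INJURED_NAGGING = 'SHADE_INJURED_NAGGING'
-- SHADE_INJURED_NOTPLAYING = 'SHADE_INJURED_NOTPLAYING'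
-- SHADE_DISORDERED = 'SHADE_DISORDERED_EATING'
-- SHADE_SELF_HARM = 'SHADE_SELFHARM'
-- SHADED_GREEN = 'SHADED_GREEN'
-- GREEN = 'GREEN'
--
--
-- def mybalance_status(status_list):
--     """Indicator of general status (single pass over status_list)."""
--     reds = (RED_TOO_MUCH, RED_TOO_LITTLE, RED_TOO_VOLATILE, RED)
--     yellows = (YELLOW_TOO_MUCH, YELLOW_TOO_LITTLE, YELLOW_TOO_VOLATILE, YELLOW)
--     shades = (SHADE_INJURED_NAGGING, SHADE_INJURED_NOTPLAYING, SHADE_DISORDERED, SHADE_SELF_HARM)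
--
--     has_red = has_yellow = has_shade = False
--     for s in status_list:
--         if s in reds:
--             has_red = True
--         elif s in yellows:
--             has_yellow = True
--         elif s in shades:
--             has_shade = True
--
--     if has_red:
--         return RED
--     if has_yellow:
--         return SHADED_YELLOW if has_shade else YELLOW
--     return SHADED_GREEN if has_shade else GREEN
-- ===== Notes on version B (the rewrite author's own statement) =====
-- stated objective: alternative
-- what changed: B replaces A's three (up to) full any()-scans of status_list with one single pass that collects three booleans has_red/has_yellow/has_shade and then applies the same priority tree.
import Mathlib
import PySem

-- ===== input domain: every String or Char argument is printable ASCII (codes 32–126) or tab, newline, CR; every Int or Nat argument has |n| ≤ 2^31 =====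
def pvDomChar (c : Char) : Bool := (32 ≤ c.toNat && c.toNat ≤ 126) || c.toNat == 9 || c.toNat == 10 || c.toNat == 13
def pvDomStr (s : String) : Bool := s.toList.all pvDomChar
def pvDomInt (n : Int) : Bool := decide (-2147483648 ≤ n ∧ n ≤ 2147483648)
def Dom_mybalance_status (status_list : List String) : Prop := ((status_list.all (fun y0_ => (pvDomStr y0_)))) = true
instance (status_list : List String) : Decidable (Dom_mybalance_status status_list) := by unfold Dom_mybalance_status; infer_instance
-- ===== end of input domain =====

-- B folds status_list once into three booleans instead of A's three any()-scans; same priority tree, same result.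

-- ===== PORT A =====
def pvReds : List String := ["RED_TOO_MUCH", "RED_TOO_LITTLE", "RED_TOO_VOLATILE", "RED"]
def pvYellows : List String := ["YELLOW_TOO_MUCH", "YELLOW_TOO_LITTLE", "YELLOW_TOO_VOLATILE", "YELLOW"]
def pvShades : List String := ["SHADE_INJURED_NAGGING", "SHADE_INJURED_NOTPLAYING", "SHADE_DISORDERED_EATING", "SHADE_SELFHARM"]

def mybalance_status (status_list : List String) : String :=
  if status_list.any (fun s => pvReds.contains s) then
    "RED"
  else if status_list.any (fun s => pvYellows.contains s) then
    if status_list.any (fun s => pvShades.contains s) then "SHADED_YELLOW" else "YELLOW"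
  else
    if status_list.any (fun s => pvShades.contains s) then "SHADED_GREEN" else "GREEN"

-- ===== PORT B =====
-- one step of B's loop: update (has_red, has_yellow, has_shade) by the elif chain
def pvStep (acc : Bool × Bool × Bool) (s : String) : Bool × Bool × Bool :=
  if pvReds.contains s then (true, acc.2.1, acc.2.2)
  else if pvYellows.contains s then (acc.1, true, acc.2.2)
  else if pvShades.contains s then (acc.1, acc.2.1, true)
  else acc

def mybalance_status_alt (status_list : List String) : String :=
  let flags := status_list.foldl pvStep (false, false, false)
  if flags.1 then "RED"
  else if flags.2.1 then (if flags.2.2 then "SHADED_YELLOW" else "YELLOW")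
  else (if flags.2.2 then "SHADED_GREEN" else "GREEN")

-- ===== PRECONDITION & SPEC =====
def Spec_mybalance_status (status_list : List String) (out : String) : Prop := out = mybalance_status_alt status_list
instance (status_list : List String) (out : String) : Decidable (Spec_mybalance_status status_list out) := by unfold Spec_mybalance_status; infer_instance

-- ===== CLAIM (what is proved, stated in full; the proofs are below) =====
def Claim_equal_mybalance_status : Prop := ∀ (status_list : List String), Dom_mybalance_status status_list → Spec_mybalance_status status_list (mybalance_status status_list)

-- ===== LEMMAS AND PROOFS =====

-- the groups are pairwise disjoint, so the elif chain records each group independently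
theorem pvRed_yellow_disjoint (s : String) : s ∈ pvReds → s ∉ pvYellows := by
  intro h
  simp [pvReds] at h
  rcases h with h | h | h | h <;> subst h <;> decide

theorem pvRed_shade_disjoint (s : String) : s ∈ pvReds → s ∉ pvShades := by
  intro h
  simp [pvReds] at h
  rcases h with h | h | h | h <;> subst h <;> decide

theorem pvYellow_shade_disjoint (s : String) : s ∈ pvYellows → s ∉ pvShades := by
  intro h
  simp [pvYellows] at h
  rcases h with h | h | h | h <;> subst h <;> decide

-- characterisation of B's fold: it computes the three any()-results of A
theorem pvFold_char (l : List String) (r y h : Bool) :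
    l.foldl pvStep (r, y, h) =
      (r || l.any (fun s => pvReds.contains s),
       y || l.any (fun s => pvYellows.contains s),
       h || l.any (fun s => pvShades.contains s)) := by
  induction l generalizing r y h with
  | nil => simp
  | cons a t ih =>
    simp only [List.foldl_cons, List.any_cons]
    by_cases hr : a ∈ pvReds
    · simp [pvStep, hr, pvRed_yellow_disjoint a hr, pvRed_shade_disjoint a hr, ih]
    · by_cases hy : a ∈ pvYellows
      · simp [pvStep, hr, hy, pvYellow_shade_disjoint a hy, ih]
      · by_cases hs : a ∈ pvShades <;> simp [pvStep, hr, hy, hs, ih]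

-- ===== VERDICT (by name: the statement is the Claim_ definition above) =====
theorem mybalance_status_spec : Claim_equal_mybalance_status := by
  intro l _
  unfold Spec_mybalance_status mybalance_status mybalance_status_alt
  rw [pvFold_char]
  simp only [Bool.false_or]
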